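-- pv_equiv track=rewrite | github.com/asdAet/django-channels-chat-react-- | tools/generate_project_docs.py | split_intro_sections
-- ===== SOURCE A (Python) =====
-- def split_intro_sections(lines: list[str]) -> tuple[str, str]:
--     paragraphs: list[str] = []
--     current: list[str] = []
--
--     for raw_line in lines:
--         stripped = raw_line.strip()
--         if not stripped:
--             if current:
--                 paragraphs.append(" ".join(current))
--                 current = []
--             continue
--         current.append(stripped)
--
--     if current:
--         paragraphs.append(" ".join(current))
--
--     if not paragraphs:
--         return "", ""
--     if len(paragraphs) == 1:
--         return paragraphs[0], ""
--     return paragraphs[0], " ".join(paragraphs[1:])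
-- ===== SOURCE B (Python) =====
-- def split_intro_sections(lines: list[str]) -> tuple[str, str]:
--     stripped = [line.strip() for line in lines]
--     n = len(stripped)
--     i = 0
--     while i < n and not stripped[i]:       # skip leading blank lines
--         i += 1
--     j = i
--     while j < n and stripped[j]:           # first maximal block of non-blank lines
--         j += 1
--     first = " ".join(stripped[i:j])
--     rest = " ".join(s for s in stripped[j:] if s)
--     return first, rest
-- ===== Notes on version B (the rewrite author's own statement) =====
-- stated objective: simpler
-- what changed: Replaces the paragraph-accumulator flush loop and intermediate paragraph list with a span decomposition over the stripped lines: skip leading blanks, take the first maximal non-blank block as the first paragraph, and join all remaining non-blank lines directly as the rest.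
import Mathlib
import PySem

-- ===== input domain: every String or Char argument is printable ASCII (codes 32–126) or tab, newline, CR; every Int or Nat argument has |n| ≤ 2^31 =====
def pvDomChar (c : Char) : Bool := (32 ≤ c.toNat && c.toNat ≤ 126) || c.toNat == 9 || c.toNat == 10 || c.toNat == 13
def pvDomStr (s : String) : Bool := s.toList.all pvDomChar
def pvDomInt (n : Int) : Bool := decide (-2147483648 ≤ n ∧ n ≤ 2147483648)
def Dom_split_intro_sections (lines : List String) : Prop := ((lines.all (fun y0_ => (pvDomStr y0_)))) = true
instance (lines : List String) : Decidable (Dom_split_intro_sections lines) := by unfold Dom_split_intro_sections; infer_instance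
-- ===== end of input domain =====

-- B replaces A's paragraph-accumulator flush loop by a span decomposition (skip blanks, take the
-- first non-blank block, join the remaining non-blank lines directly); objective: simpler.


-- ===== PORT A =====
-- the body of A's for-loop: flush `current` into `paragraphs` on a blank stripped line, else append
def stepA (acc : List String × List String) (raw_line : String) : List String × List String :=
  let stripped := PySem.Str.strip raw_line
  if stripped == "" then
    (if acc.2.isEmpty then acc else (acc.1 ++ [PySem.Str.join " " acc.2], []))
  else
    (acc.1, acc.2 ++ [stripped])

def split_intro_sections (lines : List String) : String × String :=
  let st := lines.foldl stepA ([], [])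
  let paragraphs := if st.2.isEmpty then st.1 else st.1 ++ [PySem.Str.join " " st.2]
  match paragraphs with
  | [] => ("", "")
  | [p] => (p, "")
  | p :: rest => (p, PySem.Str.join " " rest)

-- ===== PORT B =====
def split_intro_sections_alt (lines : List String) : String × String :=
  let stripped := lines.map PySem.Str.strip
  let tail := stripped.dropWhile (fun s => s == "")
  let firstBlock := tail.takeWhile (fun s => !(s == ""))
  let rest := tail.dropWhile (fun s => !(s == ""))
  (PySem.Str.join " " firstBlock, PySem.Str.join " " (rest.filter (fun s => !(s == ""))))

-- ===== PRECONDITION & SPEC =====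
def Spec_split_intro_sections (lines : List String) (out : String × String) : Prop := out = split_intro_sections_alt lines
instance (lines : List String) (out : String × String) : Decidable (Spec_split_intro_sections lines out) := by unfold Spec_split_intro_sections; infer_instance

-- ===== CLAIM (what is proved, stated in full; the proofs are below) =====
def Claim_equal_split_intro_sections : Prop := ∀ (lines : List String), Dom_split_intro_sections lines → Spec_split_intro_sections lines (split_intro_sections lines)

-- ===== LEMMAS AND PROOFS =====

-- the list of paragraphs (as word lists) A accumulates, over the already-stripped lines
def allParas : List String → List String → List (List String)
  | cur, [] => if cur = [] then [] else [cur]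
  | cur, s :: t =>
    if s = "" then (if cur = [] then allParas [] t else cur :: allParas [] t)
    else allParas (cur ++ [s]) t

lemma foldA_eq : ∀ (l ps cur : List String),
    (if (l.foldl stepA (ps, cur)).2.isEmpty then (l.foldl stepA (ps, cur)).1
     else (l.foldl stepA (ps, cur)).1 ++ [PySem.Str.join " " (l.foldl stepA (ps, cur)).2])
    = ps ++ (allParas cur (l.map PySem.Str.strip)).map (PySem.Str.join " ") := by
  intro l
  induction l with
  | nil =>
    intro ps cur
    by_cases h : cur = [] <;> simp [allParas, h]
  | cons s t ih =>
    intro ps cur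
    by_cases h : PySem.Str.strip s = ""
    · by_cases hc : cur = []
      · simpa [List.foldl, stepA, h, hc, allParas] using ih ps []
      · simpa [List.foldl, stepA, h, hc, allParas] using ih (ps ++ [PySem.Str.join " " cur]) []
    · simpa [List.foldl, stepA, h, allParas] using ih ps (cur ++ [PySem.Str.strip s])

lemma curPara : ∀ (l cur : List String), cur ≠ [] →
    allParas cur l
      = (cur ++ l.takeWhile (fun s => !(s == ""))) :: allParas [] (l.dropWhile (fun s => !(s == ""))) := by
  intro l
  induction l with
  | nil => intro cur hc; simp [allParas, hc]
  | cons s t ih =>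
    intro cur hc
    by_cases h : s = ""
    · simp [allParas, h, hc]
    · have hb : (s == "") = false := by simpa using h
      have hne : cur ++ [s] ≠ [] := by simp
      simp [allParas, h, hb, ih _ hne]

lemma ap_nil : ∀ (L : List String), L.dropWhile (fun s => s == "") = [] → allParas [] L = [] := by
  intro L
  induction L with
  | nil => intro _; simp [allParas]
  | cons s t ih =>
    intro h
    by_cases hs : s = ""
    · have hb : (s == "") = true := by simpa using hs
      rw [List.dropWhile_cons, hb] at h
      simp at h
      simp [allParas, hs, ih (by simpa using h)]
    · have hb : (s == "") = false := by simpa using hs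
      rw [List.dropWhile_cons, hb] at h
      simp at h

lemma ap_cons : ∀ (L : List String) (t₀ : String) (ts : List String),
    L.dropWhile (fun s => s == "") = t₀ :: ts →
    t₀ ≠ "" ∧
      allParas [] L
        = (t₀ :: ts.takeWhile (fun s => !(s == ""))) :: allParas [] (ts.dropWhile (fun s => !(s == ""))) := by
  intro L
  induction L with
  | nil => intro t₀ ts h; simp at h
  | cons s t ih =>
    intro t₀ ts h
    by_cases hs : s = ""
    · have hb : (s == "") = true := by simpa using hs
      rw [List.dropWhile_cons, hb] at h
      simp at h
      obtain ⟨h1, h2⟩ := ih t₀ ts (by simpa using h)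
      exact ⟨h1, by simp [allParas, hs, h2]⟩
    · have hb : (s == "") = false := by simpa using hs
      rw [List.dropWhile_cons, hb] at h
      simp at h
      obtain ⟨rfl, rfl⟩ := h
      refine ⟨hs, ?_⟩
      simp [allParas, hs, curPara t ([s]) (by simp)]

lemma flatten_ap : ∀ (l cur : List String),
    (allParas cur l).flatten = cur ++ l.filter (fun s => !(s == "")) := by
  intro l
  induction l with
  | nil => intro cur; by_cases h : cur = [] <;> simp [allParas, h]
  | cons s t ih =>
    intro cur
    by_cases h : s = ""
    · by_cases hc : cur = [] <;> simp [allParas, h, hc, ih]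
    · simp [allParas, h, ih]

lemma ne_nil_ap : ∀ (l cur : List String), ∀ p ∈ allParas cur l, p ≠ [] := by
  intro l
  induction l with
  | nil =>
    intro cur p hp
    by_cases h : cur = [] <;> simp [allParas, h] at hp
    subst hp; exact h
  | cons s t ih =>
    intro cur p hp
    by_cases h : s = ""
    · by_cases hc : cur = []
      · simp [allParas, h, hc] at hp
        exact ih [] p hp
      · simp [allParas, h, hc] at hp
        rcases hp with rfl | hp
        · exact hc
        · exact ih [] p hp
    · simp [allParas, h] at hp
      exact ih _ p hp

lemma ic_singleton (sep x : List Char) : sep.intercalate [x] = x := by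
  simp [List.intercalate, List.intersperse]

lemma ic_cc (sep x y : List Char) (zs : List (List Char)) :
    sep.intercalate (x :: y :: zs) = x ++ sep ++ sep.intercalate (y :: zs) := by
  simp [List.intercalate, List.intersperse, List.append_assoc]

lemma icalate_append (sep : List Char) :
    ∀ (xs ys : List (List Char)), xs ≠ [] → ys ≠ [] →
      sep.intercalate (xs ++ ys) = sep.intercalate xs ++ sep ++ sep.intercalate ys := by
  intro xs
  induction xs with
  | nil => intro ys h _; exact absurd rfl h
  | cons x xs ih =>
    intro ys _ hys
    cases xs with
    | nil =>
      cases ys with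
      | nil => exact absurd rfl hys
      | cons y ys => simp [ic_cc, ic_singleton, List.append_assoc]
    | cons x' xs' =>
      have hih := ih ys (by simp) hys
      simp only [List.cons_append] at hih
      simp only [List.cons_append, ic_cc, hih]
      simp [List.append_assoc]

lemma icalate_flat (sep : List Char) :
    ∀ (pss : List (List (List Char))), (∀ p ∈ pss, p ≠ []) →
      sep.intercalate (pss.map sep.intercalate) = sep.intercalate pss.flatten := by
  intro pss
  induction pss with
  | nil => intro _; simp
  | cons p rest ih =>
    intro h
    cases rest with
    | nil => simp [ic_singleton]
    | cons q rest' =>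
      have hrest : ∀ r ∈ q :: rest', r ≠ [] := fun r hr => h r (by simp [hr])
      have hq : q ≠ [] := hrest q (by simp)
      have hflat : (q :: rest').flatten ≠ [] := by
        cases q with
        | nil => exact absurd rfl hq
        | cons a as => simp [List.flatten]
      have hp : p ≠ [] := h p (by simp)
      have lhs : sep.intercalate ((p :: q :: rest').map sep.intercalate)
          = sep.intercalate p ++ sep ++ sep.intercalate ((q :: rest').map sep.intercalate) := by
        have := icalate_append sep [sep.intercalate p] ((q :: rest').map sep.intercalate)
          (by simp) (by simp)
        simpa [ic_singleton] using this
      have rhs : sep.intercalate ((p :: q :: rest').flatten)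
          = sep.intercalate p ++ sep ++ sep.intercalate ((q :: rest').flatten) := by
        have := icalate_append sep p ((q :: rest').flatten) hp hflat
        simpa [List.flatten] using this
      rw [lhs, rhs, ih hrest]

lemma strJoinFlat (ps : List (List String)) (h : ∀ p ∈ ps, p ≠ []) :
    PySem.Str.join " " (ps.map (PySem.Str.join " ")) = PySem.Str.join " " ps.flatten := by
  simp only [PySem.Str.join, PySem.Chars.join]
  congr 1
  rw [List.map_map]
  have hmap : (String.toList ∘ PySem.Str.join " ")
      = fun p : List String => (" ".toList).intercalate (p.map String.toList) := by
    funext p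
    simp [PySem.Str.join, PySem.Chars.join]
  rw [hmap]
  have h1 : (fun p : List String => (" ".toList).intercalate (p.map String.toList))
      = ((" ".toList).intercalate ∘ List.map String.toList) := rfl
  rw [h1, ← List.map_map]
  have hne : ∀ p ∈ ps.map (List.map String.toList), p ≠ [] := by
    intro p hp
    simp only [List.mem_map] at hp
    obtain ⟨q, hq, rfl⟩ := hp
    simpa using h q hq
  rw [icalate_flat _ (ps.map (List.map String.toList)) hne, ← List.map_flatten]

lemma join_nil_str : PySem.Str.join " " ([] : List String) = "" := by
  simp [PySem.Str.join, PySem.Chars.join, List.intercalate]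

-- ===== VERDICT (by name: the statement is the Claim_ definition above) =====
theorem split_intro_sections_spec : Claim_equal_split_intro_sections := by
  intro lines _
  unfold Spec_split_intro_sections
  simp only [split_intro_sections, split_intro_sections_alt]
  rw [foldA_eq lines [] []]
  rcases hT : (lines.map PySem.Str.strip).dropWhile (fun s => s == "") with _ | ⟨t₀, ts⟩
  · rw [ap_nil _ hT]
    simp [join_nil_str]
  · obtain ⟨ht₀, hAP⟩ := ap_cons _ _ _ hT
    rw [hAP]
    have hbne : (t₀ == "") = false := by simpa using ht₀
    rcases h2 : allParas [] (ts.dropWhile (fun s => !(s == ""))) with _ | ⟨P, Ps⟩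
    · have hfil : (List.dropWhile (fun s : String => !(s == "")) ts).filter (fun s => !(s == "")) = [] := by
        have := flatten_ap (ts.dropWhile (fun s => !(s == ""))) []
        rw [h2] at this
        simpa using this.symm
      simp [hbne, hfil, join_nil_str]
    · have hjoin : PySem.Str.join " " ((allParas [] (ts.dropWhile (fun s => !(s == "")))).map (PySem.Str.join " "))
          = PySem.Str.join " " ((ts.dropWhile (fun s : String => !(s == ""))).filter (fun s => !(s == ""))) := by
        rw [strJoinFlat _ (ne_nil_ap _ []), flatten_ap]
        simp
      rw [h2] at hjoin
      simp only [List.map_cons] at hjoin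
      simp [hbne, hjoin]
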